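-- pv_equiv track=rewrite | github.com/krystalzeng/deep-fashion | code/Image_dictionary_generate.py | find_time_elapsed
-- ===== SOURCE A (Python) =====
-- def find_time_elapsed(x):
-- 	end = x.find(' ago.') - 1
-- 	start = end
-- 	date = ''
-- 	for i in range(start, 0, -1):
-- 		if x[i] != '>':
-- 			date += x[i]
-- 		else:
-- 			break
-- 	return date[::-1]
-- ===== SOURCE B (Python) =====
-- def find_time_elapsed(x):
--     i = x.find(' ago.')
--     if i == -1:
--         return ''
--     date = ''
--     for ch in x[1:i]:
--         date = '' if ch == '>' else date + ch
--     return date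
-- ===== Notes on version B (the rewrite author's own statement) =====
-- stated objective: simpler
-- what changed: A scans backward from the ' ago.' marker collecting characters until it hits '>' and then reverses the accumulated string; B makes one forward pass over the slice x[1:find(' ago.')], resetting its accumulator at each '>', so the break and the final reversal disappear.
import Mathlib
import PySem

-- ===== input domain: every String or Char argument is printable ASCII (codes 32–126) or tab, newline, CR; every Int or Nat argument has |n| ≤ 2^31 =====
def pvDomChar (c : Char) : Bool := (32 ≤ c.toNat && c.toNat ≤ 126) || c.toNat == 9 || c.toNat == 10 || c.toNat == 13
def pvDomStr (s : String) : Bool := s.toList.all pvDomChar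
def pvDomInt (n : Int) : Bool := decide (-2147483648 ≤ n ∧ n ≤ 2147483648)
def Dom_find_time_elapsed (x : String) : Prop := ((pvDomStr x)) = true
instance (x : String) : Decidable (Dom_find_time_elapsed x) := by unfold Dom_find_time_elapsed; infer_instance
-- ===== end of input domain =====

-- B replaces A's backward scan-until-'>' with break and final reversal by a single forward
-- pass over the slice before ' ago.' that resets its accumulator at each '>' (objective: simpler).

-- ===== PORT A =====
-- A: end = find(' ago.')-1; walk i = end..1 collecting x[i] until '>', then reverse.
-- The fold state is (collected chars, broke?); the pyGet? 'none' arm is unreachable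
-- (every visited index satisfies 1 ≤ i ≤ end < len x whenever the range is nonempty).
def find_time_elapsed (x : String) : String :=
  let e : Int := PySem.Str.find x " ago." - 1
  let res := (PySem.List.pyRange e 0 (-1)).foldl
    (fun (st : List Char × Bool) i =>
      if st.2 then st
      else match PySem.Str.pyGet? x i with
        | some c => if c ≠ '>' then (st.1 ++ [c], false) else (st.1, true)
        | none => (st.1, true))
    ([], false)
  String.ofList res.1.reverse

-- ===== PORT B =====
def find_time_elapsed_alt (x : String) : String :=
  let i := PySem.Str.find x " ago."
  if i = -1 then ""
  else
    String.ofList ((PySem.Str.slice x (some 1) (some i)).toList.foldl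
      (fun date ch => if ch = '>' then [] else date ++ [ch]) [])

-- ===== PRECONDITION & SPEC =====
def Spec_find_time_elapsed (x : String) (out : String) : Prop := out = find_time_elapsed_alt x
instance (x : String) (out : String) : Decidable (Spec_find_time_elapsed x out) := by unfold Spec_find_time_elapsed; infer_instance

-- ===== CLAIM (what is proved, stated in full; the proofs are below) =====
def Claim_equal_find_time_elapsed : Prop := ∀ (x : String), Dom_find_time_elapsed x → Spec_find_time_elapsed x (find_time_elapsed x)

-- ===== LEMMAS AND PROOFS =====

-- A's loop body on an already-fetched character.
def pvStep (st : List Char × Bool) (c : Char) : List Char × Bool :=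
  if st.2 then st else if c ≠ '>' then (st.1 ++ [c], false) else (st.1, true)

-- B's loop body.
def pvReset (date : List Char) (ch : Char) : List Char :=
  if ch = '>' then [] else date ++ [ch]

theorem pvBreakFold_true (cs : List Char) (acc : List Char) :
    cs.foldl pvStep (acc, true) = (acc, true) := by
  induction cs with
  | nil => rfl
  | cons c cs ih => rw [List.foldl_cons]; exact ih

theorem pvBreakFold (cs : List Char) (acc : List Char) :
    cs.foldl pvStep (acc, false) =
      (acc ++ cs.takeWhile (· ≠ '>'), cs.any (· == '>')) := by
  induction cs generalizing acc with
  | nil => simp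
  | cons c cs ih =>
    rw [List.foldl_cons]
    by_cases h : c = '>'
    · subst h
      have h1 : pvStep (acc, false) '>' = (acc, true) := by simp [pvStep]
      rw [h1, pvBreakFold_true]
      simp
    · have h1 : pvStep (acc, false) c = (acc ++ [c], false) := by simp [pvStep, h]
      rw [h1, ih]
      simp [h]

theorem pvResetFold (u : List Char) (acc : List Char) :
    u.foldl pvReset acc =
      if '>' ∈ u then ((u.reverse.takeWhile (· ≠ '>')).reverse) else acc ++ u := by
  induction u using List.reverseRecOn generalizing acc with
  | nil => simp
  | append_singleton u c ih =>
    rw [List.foldl_append, List.foldl_cons, List.foldl_nil]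
    by_cases h : c = '>'
    · subst h
      have h1 : ∀ d, pvReset d '>' = [] := by intro d; simp [pvReset]
      simp [h1]
    · have h1 : pvReset (u.foldl pvReset acc) c = u.foldl pvReset acc ++ [c] := by
        simp [pvReset, h]
      have h2 : ¬('>' = c) := fun e => h e.symm
      rw [h1, ih]
      by_cases hm : '>' ∈ u <;> simp [hm, h, h2]

-- The characters A's loop visits are exactly the reverse of B's slice.
theorem pvMapRange (l : List Char) (k : Nat) (hk : k ≤ l.length) :
    (PySem.List.pyRange 1 (k : Int)).map (fun i => l.getD i.toNat ' ') =
      (l.drop 1).take (k - 1) := by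
  rw [PySem.List.pyRange_one]
  apply List.ext_getElem
  · simp; omega
  · intro j h1 h2
    simp only [List.map_map, List.getElem_map, List.getElem_take, List.getElem_drop]
    have hj : j < ((k : Int) - 1).toNat := by simpa using h1
    have hjl : 1 + j < l.length := by omega
    have hcast : ((1 : Int) + ((j : Nat) : Int)).toNat = 1 + j := by omega
    rw [List.getElem_range]
    simp only [Function.comp]
    rw [hcast, List.getD_eq_getElem?_getD, List.getElem?_eq_getElem hjl]
    simp [Nat.add_comm]

theorem find_time_elapsed_eq (x : String) :
    find_time_elapsed x = find_time_elapsed_alt x := by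
  unfold find_time_elapsed find_time_elapsed_alt
  dsimp only
  rw [PySem.Str.find_eq]
  set l := x.toList with hl
  by_cases hneg : PySem.Chars.find l (" ago.".toList) = -1
  · rw [hneg]
    have hr : PySem.List.pyRange ((-1 : Int) - 1) 0 (-1) = [] := by decide
    rw [hr]
    simp
  · have hge : 0 ≤ PySem.Chars.find l (" ago.".toList) := by
      have := PySem.Chars.neg_one_le_find l (" ago.".toList)
      omega
    set k : Nat := (PySem.Chars.find l (" ago.".toList)).toNat with hkdef
    have hkval : PySem.Chars.find l (" ago.".toList) = (k : Int) := by omega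
    have hpre := (PySem.Chars.find_spec hge).1
    have hlen : k + 5 ≤ l.length := by
      have h5 := hpre.length_le
      simp only [List.length_drop] at h5
      have : (" ago.".toList).length = 5 := by decide
      omega
    rw [hkval]
    -- A's descending range is the reverse of the ascending one
    have hrange : PySem.List.pyRange ((k : Int) - 1) 0 (-1) =
        ((PySem.List.pyRange 1 (k : Int))).reverse := by
      rw [PySem.List.pyRange_neg_one_eq_reverse]
      norm_num
    rw [hrange]
    -- every visited lookup succeeds; replace the body by pvStep on the fetched char
    have hbody : ∀ (st : List Char × Bool) i, i ∈ ((PySem.List.pyRange 1 (k : Int))).reverse →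
        (if st.2 then st
         else match PySem.Str.pyGet? x i with
           | some c => if c ≠ '>' then (st.1 ++ [c], false) else (st.1, true)
           | none => (st.1, true)) =
        pvStep st (l.getD i.toNat ' ') := by
      intro st i hi
      rw [List.mem_reverse, PySem.List.mem_pyRange_one] at hi
      have hi2 : i.toNat < l.length := by omega
      have hget : PySem.Str.pyGet? x i = some (l.getD i.toNat ' ') := by
        have h0 : i = ((i.toNat : Nat) : Int) := by omega
        rw [h0, PySem.Str.pyGet?_natCast, ← hl]
        simp only [List.getD_eq_getElem?_getD]
        have hmax : ((i.toNat : Nat) : Int).toNat = i.toNat := by omega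
        rw [hmax, List.getElem?_eq_getElem hi2]
        rfl
      rw [hget]
      rfl
    rw [PySem.List.foldl_congr_mem _ _ _ _ hbody]
    rw [← List.foldl_map (f := fun i : Int => l.getD i.toNat ' ') (g := pvStep),
      List.map_reverse, pvMapRange l k (by omega)]
    rw [pvBreakFold]
    -- B's side
    have hne : ¬ ((k : Int) = -1) := by omega
    rw [if_neg hne]
    have hslice : (PySem.Str.slice x (some 1) (some (k : Int))).toList =
        (l.drop 1).take (k - 1) := by
      rw [PySem.Str.toList_slice, PySem.Chars.slice_eq_listSlice, ← hl,
        PySem.List.slice_toNat l (by norm_num) (by omega)]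
      simp
    have hfold : ∀ (u : List Char),
        (u.foldl (fun date ch => if ch = '>' then [] else date ++ [ch]) []) =
          u.foldl pvReset [] := fun _ => rfl
    rw [hslice, hfold, pvResetFold]
    set seg := (l.drop 1).take (k - 1) with hseg
    by_cases hm : '>' ∈ seg
    · rw [if_pos hm]
      simp
    · have hall : seg.reverse.takeWhile (· ≠ '>') = seg.reverse := by
        rw [List.takeWhile_eq_self_iff]
        intro c hc
        rw [List.mem_reverse] at hc
        simp only [ne_eq, decide_eq_true_eq]
        intro h; exact hm (h ▸ hc)
      rw [if_neg hm, hall]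
      simp

-- ===== VERDICT (by name: the statement is the Claim_ definition above) =====
theorem find_time_elapsed_spec : Claim_equal_find_time_elapsed := by
  intro x _
  unfold Spec_find_time_elapsed
  exact find_time_elapsed_eq x
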